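-- pv_equiv track=rewrite | github.com/Mekylei-Belchior/lotofacil | combinacoes/analises.py | obter_indices
-- ===== SOURCE A (Python) =====
-- def buscar(lista, elem_ini, elem_fin, valor_busca):
-- 	"""
-- 	Busca binária em uma lista.
--
--
-- 	:param lista: lista que contém os elementos
-- 	:param elem_ini: Elemento inicial da lista ou sub-lista
-- 	:param elem_fin: Elemento final da lista ou sub-lista
-- 	:param valor_busca: Valor a ser encontrado
--
-- 	return: O elemento buscado, caso ele esteja na lista.
-- 	"""
-- 	if elem_ini <= elem_fin:
-- 		# Elemento do meio da lista
-- 		meio = (elem_ini + elem_fin) // 2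
--
-- 		if valor_busca > lista[meio]:
-- 			return buscar(lista, meio + 1, elem_fin, valor_busca)
-- 		elif valor_busca < lista[meio]:
-- 			return buscar(lista, elem_ini, meio -1, valor_busca)
-- 		else:
-- 			# Encontrou o elemento da busca
-- 			return meio
--
-- def obter_indices(possibilidades, resultado_concursos):
-- 	"""
-- 	Obtém os índices da lista de possibilidades dos resultados já sorteados.
--
-- 	:param possibilidades: Combinações possíveis da Lotofácil
-- 	:param resultado_concursos: Resultado de todos os concursos
--
-- 	return:	Uma lista com os índice dos resultados já sorteados nos concursos.
-- 	"""
-- 	elem_ini = 0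
-- 	elem_fin = len(possibilidades) - 1
--
-- 	indices = [buscar(
--                       possibilidades,
--                       elem_ini,
--                       elem_fin,
--                       valor_busca
--                      ) for valor_busca in resultado_concursos]
--
-- 	return indices
-- ===== SOURCE B (Python) =====
-- def obter_indices(possibilidades, resultado_concursos):
--     # Slice-based binary search: recurse on ever-smaller sublists carrying the
--     # offset of the sublist, instead of lo/hi index arithmetic on the whole list.
--     def buscar_fatia(seq, base, valor):
--         if not seq:
--             return None
--         meio = (len(seq) - 1) // 2
--         if valor > seq[meio]:
--             return buscar_fatia(seq[meio + 1:], base + meio + 1, valor)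
--         elif valor < seq[meio]:
--             return buscar_fatia(seq[:meio], base, valor)
--         else:
--             return base + meio
--
--     return [buscar_fatia(possibilidades, 0, v) for v in resultado_concursos]
-- ===== Notes on version B (the rewrite author's own statement) =====
-- stated objective: alternative
-- what changed: Replaces the lo/hi index-arithmetic recursion of A's buscar with a recursion on ever-smaller list slices carrying an offset (and no separate helper signature with four parameters); same probe sequence, so identical results including None on miss and on unsorted input.
import Mathlib
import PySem

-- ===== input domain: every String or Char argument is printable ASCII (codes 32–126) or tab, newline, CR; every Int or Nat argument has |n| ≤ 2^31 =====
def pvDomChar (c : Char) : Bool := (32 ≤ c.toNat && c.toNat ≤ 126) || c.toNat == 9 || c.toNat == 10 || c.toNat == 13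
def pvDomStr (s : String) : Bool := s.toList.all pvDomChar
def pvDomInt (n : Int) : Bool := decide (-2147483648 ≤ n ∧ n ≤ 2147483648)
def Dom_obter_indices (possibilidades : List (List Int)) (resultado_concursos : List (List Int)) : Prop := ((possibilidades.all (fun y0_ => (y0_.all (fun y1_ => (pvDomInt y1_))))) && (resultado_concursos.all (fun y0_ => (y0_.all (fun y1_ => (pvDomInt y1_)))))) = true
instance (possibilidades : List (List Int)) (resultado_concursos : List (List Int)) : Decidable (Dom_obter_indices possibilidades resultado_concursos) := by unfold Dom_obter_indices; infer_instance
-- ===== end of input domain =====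

-- ===== PORT A =====
-- B replaces A's lo/hi index-bound recursion by a recursion on list slices with an offset;
-- objective: alternative decomposition (same probe sequence, same results).

-- literal port of A's recursive `buscar`; `lista[meio]` via pyGet? (none = IndexError, never
-- reached from obter_indices, whose ranges are always in bounds)
def buscar (lista : List (List Int)) (elem_ini elem_fin : Int) (valor_busca : List Int) : Option Int :=
  if elem_ini ≤ elem_fin then
    let meio := PySem.Int.floordiv (elem_ini + elem_fin) 2
    match PySem.List.pyGet? lista meio with
    | none => none
    | some x =>
      if x < valor_busca then buscar lista (meio + 1) elem_fin valor_busca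
      else if valor_busca < x then buscar lista elem_ini (meio - 1) valor_busca
      else some meio
  else none
termination_by (elem_fin - elem_ini + 1).toNat
decreasing_by
  all_goals
    have h2 := PySem.Int.floordiv_two_mid_bounds (lo := elem_ini) (hi := elem_fin) (by omega)
    omega

def obter_indices (possibilidades : List (List Int)) (resultado_concursos : List (List Int)) : List (Option Int) :=
  let elem_ini : Int := 0
  let elem_fin : Int := (possibilidades.length : Int) - 1
  resultado_concursos.map (fun valor_busca => buscar possibilidades elem_ini elem_fin valor_busca)

-- ===== PORT B =====
-- port of Source B's `buscar_fatia`: recursion on slices (seq[meio+1:] = drop, seq[:meio] = take)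
def buscar_fatia (seq : List (List Int)) (base : Int) (valor : List Int) : Option Int :=
  match h : seq with
  | [] => none
  | a :: rest =>
    let meio := (seq.length - 1) / 2
    have hm : meio < seq.length := by subst h; simp only [List.length_cons, meio]; omega
    let x := seq[meio]
    if x < valor then buscar_fatia (seq.drop (meio + 1)) (base + (meio : Int) + 1) valor
    else if valor < x then buscar_fatia (seq.take meio) base valor
    else some (base + (meio : Int))
termination_by seq.length
decreasing_by
  · subst h; simp only [List.length_drop, List.length_cons]; omega
  · subst h; simp only [List.length_take, List.length_cons]; omega

def obter_indices_alt (possibilidades : List (List Int)) (resultado_concursos : List (List Int)) : List (Option Int) :=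
  resultado_concursos.map (fun v => buscar_fatia possibilidades 0 v)


-- ===== PORT B =====
-- ===== PRECONDITION & SPEC =====
def Spec_obter_indices (possibilidades : List (List Int)) (resultado_concursos : List (List Int)) (out : List (Option Int)) : Prop := out = obter_indices_alt possibilidades resultado_concursos
instance (possibilidades : List (List Int)) (resultado_concursos : List (List Int)) (out : List (Option Int)) : Decidable (Spec_obter_indices possibilidades resultado_concursos out) := by unfold Spec_obter_indices; infer_instance

-- ===== CLAIM (what is proved, stated in full; the proofs are below) =====
def Claim_equal_obter_indices : Prop := ∀ (possibilidades : List (List Int)) (resultado_concursos : List (List Int)), Dom_obter_indices possibilidades resultado_concursos → Spec_obter_indices possibilidades resultado_concursos (obter_indices possibilidades resultado_concursos)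

-- ===== LEMMAS AND PROOFS =====


-- key invariant: A's search on index range [lo, hi] equals B's search on the slice
-- lista[lo : hi+1] carried with offset lo
theorem buscar_eq_fatia (lista : List (List Int)) (v : List Int) :
    ∀ (n : Nat) (lo hi : Int), (hi + 1 - lo).toNat = n → 0 ≤ lo → hi < (lista.length : Int) →
      buscar lista lo hi v = buscar_fatia ((lista.drop lo.toNat).take n) lo v := by
  intro n
  induction n using Nat.strong_induction_on with
  | _ n ih =>
    intro lo hi hn hlo hhi
    by_cases hle : lo ≤ hi
    · -- nonempty range: one probe, then the induction hypothesis on each side of the midpoint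
      have hn1 : 1 ≤ n := by omega
      have hfd : PySem.Int.floordiv (lo + hi) 2 = (lo + hi) / 2 :=
        PySem.Int.floordiv_eq_ediv_of_pos (by omega)
      set mA : Int := (lo + hi) / 2 with hmA
      set mB : Nat := (n - 1) / 2 with hmB
      have hAB : mA = lo + (mB : Int) := by omega
      have hmAlo : lo ≤ mA := by omega
      have hmAhi : mA ≤ hi := by omega
      -- the probed elements coincide
      obtain ⟨x, hx⟩ : ∃ x, lista[mA.toNat]? = some x :=
        ⟨_, List.getElem?_eq_getElem (by omega)⟩
      have hget : PySem.List.pyGet? lista mA = some x :=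
        (PySem.List.pyGet?_of_nonneg lista (show (0:Int) ≤ mA by omega)).trans hx
      have hseqget : ((lista.drop lo.toNat).take n)[mB]? = some x := by
        rw [List.getElem?_take_of_lt (by omega), List.getElem?_drop]
        have h9 : lo.toNat + mB = mA.toNat := by omega
        rw [h9]; exact hx
      -- destructure the slice
      obtain ⟨a, rest, hcons⟩ : ∃ a rest, (lista.drop lo.toNat).take n = a :: rest := by
        cases hseq : (lista.drop lo.toNat).take n with
        | nil => rw [hseq] at hseqget; simp at hseqget
        | cons a rest => exact ⟨a, rest, rfl⟩
      have hlen : (a :: rest).length = n := by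
        rw [← hcons]; simp only [List.length_take, List.length_drop]; omega
      rw [hcons] at hseqget
      have hmBlt : mB < n := by omega
      have hxB : (a :: rest)[mB]'(by omega) = x := by
        have h8 := List.getElem?_eq_getElem (l := a :: rest) (i := mB) (by omega)
        rw [h8] at hseqget; exact Option.some.inj hseqget
      rw [buscar, hcons, buscar_fatia]
      simp only [if_pos hle, hfd, hlen, ← hmB, hxB, hget]
      split_ifs with hgt hlt
      · have hdrop : (a :: rest).drop (mB + 1)
            = (lista.drop (mA + 1).toNat).take ((hi + 1 - (mA + 1)).toNat) := by
          rw [← hcons, List.drop_take, List.drop_drop]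
          have h1 : lo.toNat + (mB + 1) = (mA + 1).toNat := by omega
          have h2 : n - (mB + 1) = (hi + 1 - (mA + 1)).toNat := by omega
          rw [h1, h2]
        rw [hdrop, show lo + (mB : Int) + 1 = mA + 1 by omega]
        exact ih _ (by omega) (mA + 1) hi rfl (by omega) hhi
      · have htake : (a :: rest).take mB = (lista.drop lo.toNat).take mB := by
          rw [← hcons, List.take_take]; congr 1; omega
        rw [htake]
        exact ih mB (by omega) lo (mA - 1) (by omega) hlo (by omega)
      · rw [hAB]
    · have : n = 0 := by omega
      subst this
      rw [buscar]
      simp [hle, buscar_fatia]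

-- ===== VERDICT (by name: the statement is the Claim_ definition above) =====
theorem obter_indices_spec : Claim_equal_obter_indices := by
  intro poss res _
  unfold Spec_obter_indices obter_indices obter_indices_alt
  refine List.map_congr_left (fun v _ => ?_)
  have h := buscar_eq_fatia poss v poss.length 0 ((poss.length : Int) - 1) (by omega) (by omega) (by omega)
  simpa using h
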